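-- pv_equiv track=rewrite | github.com/Rasbon99/coding-challenges | dp-challenges/undirectionalTSP.py | solveUnidirectionalTSP
-- ===== SOURCE A (Python) =====
-- def solveUnidirectionalTSP(n, m, matrix):
--     memo = [[-1 for _ in range(m+1)] for _ in range(n+1)]
--
--     def uTSP(i, j):
--         if j == m:
--             return 0
--
--         if i == n:
--             i = 0
--         if i == -1:
--             i = n-1
--
--         if memo[i][j] != -1:
--             return memo[i][j]
--
--         memo[i][j] = min(uTSP(i-1, j+1) + matrix[i][j],
--                          uTSP(i, j+1) + matrix[i][j],
--                          uTSP(i+1,j+1) + matrix[i][j])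
--
--         return memo[i][j]
--     min_list = []
--     for i in range(n):
--         min_list.append(uTSP(i, 0))
--
--     return min(min_list)
-- ===== SOURCE B (Python) =====
-- def solveUnidirectionalTSP(n, m, matrix):
--     dp = [0] * n
--     for j in range(m - 1, -1, -1):
--         dp = [matrix[i][j] + min(dp[(i - 1) % n], dp[i], dp[(i + 1) % n])
--               for i in range(n)]
--     return min(dp)
-- ===== Notes on version B (the rewrite author's own statement) =====
-- stated objective: simpler
-- what changed: Replaces the memoized top-down recursion (closure mutating an (n+1)x(m+1) memo table, wrap handled by explicit i==n / i==-1 reassignments) by a bottom-up iterative DP over columns with modular row indexing and no recursion or memo table.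
import Mathlib
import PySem

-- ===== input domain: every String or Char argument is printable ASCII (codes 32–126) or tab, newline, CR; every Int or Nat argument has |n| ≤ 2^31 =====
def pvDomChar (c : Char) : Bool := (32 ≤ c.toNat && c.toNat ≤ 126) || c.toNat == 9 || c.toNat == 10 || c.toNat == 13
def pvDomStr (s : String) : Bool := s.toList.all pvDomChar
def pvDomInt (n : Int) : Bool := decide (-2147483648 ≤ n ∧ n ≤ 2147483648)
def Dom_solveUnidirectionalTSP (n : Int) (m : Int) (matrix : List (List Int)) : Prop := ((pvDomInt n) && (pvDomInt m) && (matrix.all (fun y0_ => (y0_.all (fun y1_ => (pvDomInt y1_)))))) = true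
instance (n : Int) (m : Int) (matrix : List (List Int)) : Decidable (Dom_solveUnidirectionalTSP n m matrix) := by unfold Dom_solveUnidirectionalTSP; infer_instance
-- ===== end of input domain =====

-- B replaces A's memoized top-down recursion by a bottom-up DP over columns (simpler, no memo table).

-- ===== PORT A =====
-- xs[i][j] read / write; exact for the non-negative in-range indices that Pre_ guarantees
def getIJ (xs : List (List Int)) (i j : Int) (d : Int) : Int :=
  PySem.List.pyGetD (PySem.List.pyGetD xs i ([] : List Int)) j d

def setIJ (xs : List (List Int)) (i j : Int) (v : Int) : List (List Int) :=
  PySem.List.pySetD xs i (PySem.List.pySetD (PySem.List.pyGetD xs i ([] : List Int)) j v)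

-- the inner recursive closure uTSP; the mutated memo table is threaded as state.
-- fuel bounds the recursion depth (j increases towards m on every call); under Pre_
-- the initial fuel m.toNat+1 is never exhausted (the equivalence proof shows this).
def uTSP_A (n m : Int) (matrix : List (List Int)) : Nat → Int → Int → List (List Int) → Int × List (List Int)
  | 0, _, _, memo => (0, memo)
  | fuel+1, i, j, memo =>
    if j = m then (0, memo)
    else
      let i := if i = n then 0 else i
      let i := if i = -1 then n - 1 else i
      if getIJ memo i j (-1) ≠ -1 then (getIJ memo i j (-1), memo)
      else
        let p1 := uTSP_A n m matrix fuel (i-1) (j+1) memo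
        let p2 := uTSP_A n m matrix fuel i (j+1) p1.2
        let p3 := uTSP_A n m matrix fuel (i+1) (j+1) p2.2
        let v := min (min (p1.1 + getIJ matrix i j 0) (p2.1 + getIJ matrix i j 0))
                     (p3.1 + getIJ matrix i j 0)
        (v, setIJ p3.2 i j v)

def solveUnidirectionalTSP (n : Int) (m : Int) (matrix : List (List Int)) : Int :=
  let memo0 := List.replicate (n+1).toNat (List.replicate (m+1).toNat (-1 : Int))
  let res := (PySem.List.pyRange 0 n 1).foldl
      (fun (st : List Int × List (List Int)) i =>
        let p := uTSP_A n m matrix (m.toNat + 1) i 0 st.2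
        (st.1 ++ [p.1], p.2)) ([], memo0)
  -- min(min_list); Python raises ValueError on an empty list — excluded by Pre_
  (PySem.List.min? res.1 (fun x => x)).getD 0

-- ===== PORT B =====
def solveUnidirectionalTSP_alt (n : Int) (m : Int) (matrix : List (List Int)) : Int :=
  let dp0 : List Int := List.replicate n.toNat 0
  let dp := (PySem.List.pyRange (m-1) (-1) (-1)).foldl
      (fun dp j =>
        (PySem.List.pyRange 0 n 1).map (fun i =>
          getIJ matrix i j 0 +
            min (min (PySem.List.pyGetD dp (PySem.Int.mod (i-1) n) 0)
                     (PySem.List.pyGetD dp i 0))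
                (PySem.List.pyGetD dp (PySem.Int.mod (i+1) n) 0))) dp0
  (PySem.List.min? dp (fun x => x)).getD 0

-- ===== PRECONDITION & SPEC =====
-- Pre_ is exactly where Python A returns normally: n ≥ 1 (min([]) raises ValueError for n ≤ 0),
-- m ≥ 0 (for m < 0 the recursion never reaches its base case: RecursionError), and — whenever a
-- matrix entry is actually read, i.e. m ≥ 1 — the first n rows exist with at least m entries
-- each (otherwise IndexError).
def Pre_solveUnidirectionalTSP (n : Int) (m : Int) (matrix : List (List Int)) : Prop :=
  1 ≤ n ∧ 0 ≤ m ∧ (0 < m → n ≤ (matrix.length : Int) ∧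
    ∀ row ∈ matrix.take n.toNat, m ≤ (row.length : Int))
instance (n : Int) (m : Int) (matrix : List (List Int)) : Decidable (Pre_solveUnidirectionalTSP n m matrix) := by unfold Pre_solveUnidirectionalTSP; infer_instance

def pvWitness_solveUnidirectionalTSP : Int × Int × List (List Int) := (2, 3, [[1, 2, 3], [4, 0, 6]])

def Spec_solveUnidirectionalTSP (n : Int) (m : Int) (matrix : List (List Int)) (out : Int) : Prop := out = solveUnidirectionalTSP_alt n m matrix
instance (n : Int) (m : Int) (matrix : List (List Int)) (out : Int) : Decidable (Spec_solveUnidirectionalTSP n m matrix out) := by unfold Spec_solveUnidirectionalTSP; infer_instance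

-- ===== CLAIM (what is proved, stated in full; the proofs are below) =====
def Claim_equal_solveUnidirectionalTSP : Prop := ∀ (n : Int) (m : Int) (matrix : List (List Int)), Dom_solveUnidirectionalTSP n m matrix → Pre_solveUnidirectionalTSP n m matrix → Spec_solveUnidirectionalTSP n m matrix (solveUnidirectionalTSP n m matrix)

-- ===== LEMMAS AND PROOFS =====

-- A's in-place wrap of the row index
def normI (n i : Int) : Int := if i = n then 0 else if i = -1 then n - 1 else i

-- the common value: V k i = best cost of a path starting at row i of column m-k
def V (n m : Int) (matrix : List (List Int)) : Nat → Int → Int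
  | 0, _ => 0
  | k+1, i =>
    getIJ matrix (normI n i) (m - (k+1)) 0 +
      min (min (V n m matrix k (normI n i - 1)) (V n m matrix k (normI n i)))
          (V n m matrix k (normI n i + 1))

lemma normI_range {n i : Int} (hn : 1 ≤ n) (h1 : -1 ≤ i) (h2 : i ≤ n) :
    0 ≤ normI n i ∧ normI n i < n := by
  unfold normI; split_ifs <;> omega

lemma normI_fix {n i : Int} (h1 : 0 ≤ i) (h2 : i < n) : normI n i = i := by
  unfold normI; split_ifs <;> omega

lemma V_congr {n m : Int} {matrix : List (List Int)} (k : Nat) {i i' : Int}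
    (h : normI n i = normI n i') : V n m matrix k i = V n m matrix k i' := by
  cases k with
  | zero => rfl
  | succ k => simp only [V, h]

lemma V_norm {n m : Int} {matrix : List (List Int)} (k : Nat) (hn : 1 ≤ n) {i : Int}
    (h1 : -1 ≤ i) (h2 : i ≤ n) : V n m matrix k (normI n i) = V n m matrix k i := by
  apply V_congr
  exact normI_fix (normI_range hn h1 h2).1 (normI_range hn h1 h2).2

lemma mod_eq_normI {n x : Int} (hn : 1 ≤ n) (h1 : -1 ≤ x) (h2 : x ≤ n) :
    PySem.Int.mod x n = normI n x := by
  rw [PySem.Int.mod_eq_emod_of_pos (by omega)]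
  unfold normI
  by_cases hx : x = n
  · rw [if_pos hx, hx, Int.emod_self]
  · rw [if_neg hx]
    by_cases hx1 : x = -1
    · rw [if_pos hx1, hx1, show (-1 : Int) = (n - 1) + n * (-1) by ring,
          Int.add_mul_emod_self_left, Int.emod_eq_of_lt (by omega) (by omega)]
    · rw [if_neg hx1, Int.emod_eq_of_lt (by omega) (by omega)]

-- the two sequential reassignments of i in uTSP are exactly normI
lemma two_ifs_eq_normI {n : Int} (i : Int) :
    (if (if i = n then 0 else i) = -1 then n - 1 else (if i = n then 0 else i)) = normI n i := by
  unfold normI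
  by_cases hin : i = n
  · rw [if_pos hin, if_neg (by omega), if_pos hin]
  · rw [if_neg hin]
    by_cases hi1 : i = -1
    · rw [if_pos hi1, if_neg hin]
    · rw [if_neg hi1, if_neg hin]

-- memo invariants
def Shape (n m : Int) (memo : List (List Int)) : Prop :=
  memo.length = (n+1).toNat ∧ ∀ row ∈ memo, row.length = (m+1).toNat

def MemOK (n m : Int) (matrix : List (List Int)) (memo : List (List Int)) : Prop :=
  ∀ i j : Int, 0 ≤ i → i < n → 0 ≤ j → j < m →
    getIJ memo i j (-1) ≠ -1 → getIJ memo i j (-1) = V n m matrix (m - j).toNat i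

lemma row_len {n m : Int} {memo : List (List Int)} (hs : Shape n m memo)
    {i : Int} (h1 : 0 ≤ i) (h2 : i < ((memo.length : Nat) : Int)) :
    (PySem.List.pyGetD memo i ([] : List Int)).length = (m+1).toNat := by
  apply hs.2
  apply PySem.List.pyGetD_mem
  constructor <;> omega

lemma shape_setIJ {n m : Int} {memo : List (List Int)} (hs : Shape n m memo)
    {i j : Int} (hi : 0 ≤ i) (hi2 : i < (memo.length : Int)) (v : Int) :
    Shape n m (setIJ memo i j v) := by
  unfold setIJ
  refine ⟨by rw [PySem.List.length_pySetD]; exact hs.1, ?_⟩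
  intro row hrow
  rw [PySem.List.pySetD_of_nonneg _ _ hi] at hrow
  rcases List.mem_or_eq_of_mem_set hrow with h | h
  · exact hs.2 row h
  · subst h
    rw [PySem.List.length_pySetD]
    exact row_len hs hi hi2

lemma getIJ_setIJ {n m : Int} {memo : List (List Int)} (hs : Shape n m memo)
    (hn : 1 ≤ n) (hm : 0 ≤ m)
    {i j i' j' : Int} (hi : 0 ≤ i) (hi2 : i < n+1) (hj : 0 ≤ j) (hj2 : j < m+1)
    (hi' : 0 ≤ i') (_hi2' : i' < n+1) (hj' : 0 ≤ j') (_hj2' : j' < m+1)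
    (v d : Int) :
    getIJ (setIJ memo i j v) i' j' d =
      if i' = i ∧ j' = j then v else getIJ memo i' j' d := by
  have hmlen : memo.length = (n+1).toNat := hs.1
  have ei : i = ((i.toNat : Nat) : Int) := (Int.toNat_of_nonneg hi).symm
  have ej : j = ((j.toNat : Nat) : Int) := (Int.toNat_of_nonneg hj).symm
  have ei' : i' = ((i'.toNat : Nat) : Int) := (Int.toNat_of_nonneg hi').symm
  have ej' : j' = ((j'.toNat : Nat) : Int) := (Int.toNat_of_nonneg hj').symm
  have hrlen : (PySem.List.pyGetD memo ((i.toNat : Nat) : Int) ([] : List Int)).length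
      = (m+1).toNat := by
    rw [Int.toNat_of_nonneg hi]; exact row_len hs hi (by omega)
  unfold getIJ setIJ
  rw [ei, ej, ei', ej',
      PySem.List.pyGetD_pySetD_natCast memo i.toNat i'.toNat _ _ (by omega)]
  by_cases hii : i'.toNat = i.toNat
  · rw [if_pos hii,
        PySem.List.pyGetD_pySetD_natCast _ j.toNat j'.toNat _ _ (by omega)]
    by_cases hjj : j'.toNat = j.toNat
    · rw [if_pos hjj, if_pos ⟨by omega, by omega⟩]
    · rw [if_neg hjj, if_neg (by intro h; exact hjj (by omega))]
      have hieq : (i'.toNat : Int) = (i.toNat : Int) := by omega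
      rw [hieq]
  · rw [if_neg hii, if_neg (by intro h; exact hii (by omega))]

lemma uTSP_ok {n m : Int} {matrix : List (List Int)}
    (hn : 1 ≤ n) (hm : 0 ≤ m) :
    ∀ (fuel : Nat) (i j : Int) (memo : List (List Int)),
      Shape n m memo → MemOK n m matrix memo →
      -1 ≤ i → i ≤ n → 0 ≤ j → j ≤ m → (m - j).toNat < fuel →
      (uTSP_A n m matrix fuel i j memo).1 = V n m matrix (m - j).toNat i ∧
      Shape n m (uTSP_A n m matrix fuel i j memo).2 ∧
      MemOK n m matrix (uTSP_A n m matrix fuel i j memo).2 := by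
  intro fuel
  induction fuel with
  | zero => intro i j memo _ _ _ _ _ _ hfuel; omega
  | succ fuel ih =>
    intro i j memo hs hok h1 h2 h3 h4 hfuel
    by_cases hjm : j = m
    · have hz : (m - j).toNat = 0 := by omega
      simp only [uTSP_A, if_pos hjm, hz]
      exact ⟨rfl, hs, hok⟩
    · have hjlt : j < m := by omega
      simp only [uTSP_A, if_neg hjm, two_ifs_eq_normI]
      set i' := normI n i with hi'def
      obtain ⟨hi'0, hi'n⟩ := normI_range hn h1 h2
      rw [← hi'def] at hi'0 hi'n
      by_cases hmemo : getIJ memo i' j (-1) ≠ -1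
      · rw [if_pos hmemo]
        refine ⟨?_, hs, hok⟩
        dsimp only
        rw [hok i' j hi'0 hi'n h3 hjlt hmemo, hi'def, V_norm _ hn h1 h2]
      · rw [if_neg hmemo]
        have hf' : (m - (j+1)).toNat < fuel := by omega
        obtain ⟨e1, hs1, hok1⟩ := ih (i'-1) (j+1) memo hs hok (by omega) (by omega) (by omega) (by omega) hf'
        obtain ⟨e2, hs2, hok2⟩ := ih i' (j+1) _ hs1 hok1 (by omega) (by omega) (by omega) (by omega) hf'
        obtain ⟨e3, hs3, hok3⟩ := ih (i'+1) (j+1) _ hs2 hok2 (by omega) (by omega) (by omega) (by omega) hf'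
        set k' := (m - (j+1)).toNat with hk'def
        have hk : (m - j).toNat = k' + 1 := by omega
        have hcol : m - ((k' : Int) + 1) = j := by omega
        have hminadd : ∀ a b c x : Int,
            min (min (a + x) (b + x)) (c + x) = x + min (min a b) c := by
          intro a b c x
          simp only [min_def]
          split_ifs <;> omega
        have hVi' : V n m matrix (m - j).toNat i' =
            getIJ matrix i' j 0 +
              min (min (V n m matrix k' (i' - 1)) (V n m matrix k' i'))
                  (V n m matrix k' (i' + 1)) := by
          rw [hk]
          show getIJ matrix (normI n i') (m - ((k' : Int) + 1)) 0 + _ = _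
          rw [hcol, normI_fix hi'0 hi'n]
        have hVi : V n m matrix (m - j).toNat i = V n m matrix (m - j).toNat i' := by
          rw [hi'def, V_norm _ hn h1 h2]
        have hval : min
            (min ((uTSP_A n m matrix fuel (i'-1) (j+1) memo).1 + getIJ matrix i' j 0)
                 ((uTSP_A n m matrix fuel i' (j+1) (uTSP_A n m matrix fuel (i'-1) (j+1) memo).2).1
                   + getIJ matrix i' j 0))
            ((uTSP_A n m matrix fuel (i'+1) (j+1)
                (uTSP_A n m matrix fuel i' (j+1) (uTSP_A n m matrix fuel (i'-1) (j+1) memo).2).2).1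
              + getIJ matrix i' j 0) = V n m matrix (m - j).toNat i' := by
          rw [e1, e2, e3, hminadd, hVi']
        have hmemolen : ((uTSP_A n m matrix fuel (i'+1) (j+1)
            (uTSP_A n m matrix fuel i' (j+1) (uTSP_A n m matrix fuel (i'-1) (j+1) memo).2).2).2.length : Int)
            = n + 1 := by
          have := hs3.1; omega
        refine ⟨?_, ?_, ?_⟩
        · dsimp only
          rw [hval, hVi]
        · exact shape_setIJ hs3 hi'0 (by omega) _
        · intro a b ha0 han hb0 hbm hne
          rw [getIJ_setIJ hs3 hn hm hi'0 (by omega) h3 (by omega) ha0 (by omega) hb0 (by omega)] at hne ⊢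
          by_cases hab : a = i' ∧ b = j
          · rw [if_pos hab]
            obtain ⟨rfl, rfl⟩ := hab
            exact hval
          · rw [if_neg hab] at hne ⊢
            exact hok3 a b ha0 han hb0 hbm hne

lemma shape_memo0 {n m : Int} :
    Shape n m (List.replicate (n+1).toNat (List.replicate (m+1).toNat (-1 : Int))) := by
  refine ⟨List.length_replicate, ?_⟩
  intro row hrow
  rw [List.eq_of_mem_replicate hrow, List.length_replicate]

lemma memok_memo0 {n m : Int} {matrix : List (List Int)} (hn : 1 ≤ n) (hm : 0 ≤ m) :
    MemOK n m matrix (List.replicate (n+1).toNat (List.replicate (m+1).toNat (-1 : Int))) := by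
  intro i j hi0 hin hj0 hjm hne
  exfalso
  apply hne
  unfold getIJ
  rw [PySem.List.pyGetD_eq_getElem _ _ hi0 (by rw [List.length_replicate]; omega),
      List.getElem_replicate,
      PySem.List.pyGetD_eq_getElem _ _ hj0 (by rw [List.length_replicate]; omega),
      List.getElem_replicate]

lemma loop_A {n m : Int} {matrix : List (List Int)} (hn : 1 ≤ n) (hm : 0 ≤ m) :
    ∀ (cnt : Nat) (a : Int) (acc : List Int) (memo : List (List Int)),
      0 ≤ a → a ≤ n → cnt = (n - a).toNat → Shape n m memo → MemOK n m matrix memo →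
      ((PySem.List.pyRange a n 1).foldl
          (fun (st : List Int × List (List Int)) i =>
            (st.1 ++ [(uTSP_A n m matrix (m.toNat + 1) i 0 st.2).1],
             (uTSP_A n m matrix (m.toNat + 1) i 0 st.2).2)) (acc, memo)).1
        = acc ++ (PySem.List.pyRange a n 1).map (V n m matrix m.toNat) := by
  intro cnt
  induction cnt with
  | zero =>
    intro a acc memo h0 h1 hcnt hs hok
    rw [PySem.List.pyRange_one_eq_nil (by omega), List.foldl_nil, List.map_nil, List.append_nil]
  | succ cnt ih =>
    intro a acc memo h0 h1 hcnt hs hok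
    rw [PySem.List.pyRange_one_cons (show a < n by omega), List.foldl_cons, List.map_cons]
    dsimp only
    obtain ⟨e, hs', hok'⟩ := uTSP_ok hn hm (m.toNat + 1) a 0 memo hs hok (by omega) (by omega)
      (by omega) hm (by omega)
    rw [ih (a+1) _ _ (by omega) (by omega) (by omega) hs' hok', e,
        show (m - 0).toNat = m.toNat by omega]
    simp

lemma stepB_eq {n m : Int} {matrix : List (List Int)} (hn : 1 ≤ n)
    (t : Nat) {j : Int} (hjt : j = m - 1 - (t : Int)) :
    ((PySem.List.pyRange 0 n 1).map (fun i =>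
        getIJ matrix i j 0 +
          min (min (PySem.List.pyGetD ((PySem.List.pyRange 0 n 1).map (V n m matrix t))
                      (PySem.Int.mod (i-1) n) 0)
                   (PySem.List.pyGetD ((PySem.List.pyRange 0 n 1).map (V n m matrix t)) i 0))
              (PySem.List.pyGetD ((PySem.List.pyRange 0 n 1).map (V n m matrix t))
                  (PySem.Int.mod (i+1) n) 0)))
      = (PySem.List.pyRange 0 n 1).map (V n m matrix (t+1)) := by
  apply List.map_congr_left
  intro i hi
  obtain ⟨hi0, hin⟩ := PySem.List.mem_pyRange_one.mp hi
  have hm1 : PySem.Int.mod (i-1) n = normI n (i-1) := mod_eq_normI hn (by omega) (by omega)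
  have hm2 : PySem.Int.mod (i+1) n = normI n (i+1) := mod_eq_normI hn (by omega) (by omega)
  obtain ⟨hl0, hln⟩ := normI_range hn (show -1 ≤ i - 1 by omega) (show i - 1 ≤ n by omega)
  obtain ⟨hr0, hrn⟩ := normI_range hn (show -1 ≤ i + 1 by omega) (show i + 1 ≤ n by omega)
  rw [hm1, hm2,
      PySem.List.pyGetD_map_pyRange_of_nonneg _ _ _ _ hl0 hln,
      PySem.List.pyGetD_map_pyRange_of_nonneg _ _ _ _ hi0 hin,
      PySem.List.pyGetD_map_pyRange_of_nonneg _ _ _ _ hr0 hrn,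
      V_norm t hn (show -1 ≤ i - 1 by omega) (show i - 1 ≤ n by omega),
      V_norm t hn (show -1 ≤ i + 1 by omega) (show i + 1 ≤ n by omega)]
  show _ = getIJ matrix (normI n i) (m - ((t : Int) + 1)) 0 +
      min (min (V n m matrix t (normI n i - 1)) (V n m matrix t (normI n i)))
          (V n m matrix t (normI n i + 1))
  rw [normI_fix hi0 hin, show m - ((t : Int) + 1) = j by omega]

lemma loop_B {n m : Int} {matrix : List (List Int)} (hn : 1 ≤ n) (hm : 0 ≤ m) :
    ∀ (cnt : Nat) (j : Int), -1 ≤ j → j ≤ m - 1 → cnt = (j+1).toNat →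
      (PySem.List.pyRange j (-1) (-1)).foldl
          (fun dp j =>
            (PySem.List.pyRange 0 n 1).map (fun i =>
              getIJ matrix i j 0 +
                min (min (PySem.List.pyGetD dp (PySem.Int.mod (i-1) n) 0)
                         (PySem.List.pyGetD dp i 0))
                    (PySem.List.pyGetD dp (PySem.Int.mod (i+1) n) 0)))
          ((PySem.List.pyRange 0 n 1).map (V n m matrix (m-1-j).toNat))
        = (PySem.List.pyRange 0 n 1).map (V n m matrix m.toNat) := by
  intro cnt
  induction cnt with
  | zero =>
    intro j h0 h1 hcnt
    rw [PySem.List.pyRange_neg_one_eq_nil (by omega), List.foldl_nil,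
        show (m-1-j).toNat = m.toNat by omega]
  | succ cnt ih =>
    intro j h0 h1 hcnt
    rw [PySem.List.pyRange_neg_one_cons (show (-1:Int) < j by omega), List.foldl_cons]
    rw [stepB_eq hn (m-1-j).toNat (by omega),
        show (m-1-j).toNat + 1 = (m-1-(j-1)).toNat by omega]
    exact ih (j-1) (by omega) (by omega) (by omega)

-- ===== VERDICT (by name: the statement is the Claim_ definition above) =====
theorem solveUnidirectionalTSP_spec : Claim_equal_solveUnidirectionalTSP := by
  intro n m matrix _ hpre
  obtain ⟨hn, hm, -⟩ := hpre
  unfold Spec_solveUnidirectionalTSP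
  simp only [solveUnidirectionalTSP, solveUnidirectionalTSP_alt]
  rw [loop_A hn hm (n - 0).toNat 0 [] _ le_rfl (by omega) rfl shape_memo0 (memok_memo0 hn hm),
      List.nil_append]
  have h0 : List.replicate n.toNat (0 : Int) = (PySem.List.pyRange 0 n 1).map (V n m matrix 0) := by
    rw [show (PySem.List.pyRange 0 n 1).map (V n m matrix 0)
          = (PySem.List.pyRange 0 n 1).map (fun _ => (0 : Int)) from
        List.map_congr_left (fun a _ => rfl),
      List.map_const', PySem.List.length_pyRange_one]
    congr 1
    omega
  have hb := loop_B (matrix := matrix) hn hm m.toNat (m-1) (by omega) (by omega) (by omega)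
  rw [show (m - 1 - (m - 1)).toNat = 0 by omega] at hb
  rw [h0, hb]
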